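-- pv_equiv track=rewrite | github.com/mitja-mandic/project_euler | project-euler_python11_20.py | najvecja_pot
-- ===== SOURCE A (Python) =====
-- def najvecja_pot(trikotnik):
--     trenutna_vsota = []
--     if len(trikotnik) == 1:
--         return trikotnik
--     else:
--         for i in range(len(trikotnik[1])):
--             vsota1 = trikotnik[1][i] + trikotnik[0][i]
--             vsota2 = trikotnik[1][i] + trikotnik[0][i+1]
--             if vsota2 > vsota1:
--                 trenutna_vsota.append(vsota2)
--             else:
--                 trenutna_vsota.append(vsota1)
--         trikotnik.pop(0)
--         trikotnik.pop(0)
--         trikotnik.insert(0, trenutna_vsota)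
--         return najvecja_pot(trikotnik)
-- ===== SOURCE B (Python) =====
-- def najvecja_pot(trikotnik):
--     # Iterative fold with an accumulator row instead of A's destructive recursion;
--     # A mutates its argument in place, so equivalence is about the return value only.
--     acc = trikotnik[0]
--     for row in trikotnik[1:]:
--         nxt = []
--         j = 0
--         for v in row:
--             nxt.append(v + max(acc[j], acc[j + 1]))
--             j += 1
--         acc = nxt
--     return [acc]
-- ===== Notes on version B (the rewrite author's own statement) =====
-- stated objective: simpler
-- what changed: Replaced A's destructive recursion (per-step pop/pop/insert, a range-index comprehension with an explicit if tie-break, and a recursive call per row) by one iterative fold over the rows that merges each row into an accumulator list with max(); B never mutates its argument (return-value equivalence).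
import Mathlib
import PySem

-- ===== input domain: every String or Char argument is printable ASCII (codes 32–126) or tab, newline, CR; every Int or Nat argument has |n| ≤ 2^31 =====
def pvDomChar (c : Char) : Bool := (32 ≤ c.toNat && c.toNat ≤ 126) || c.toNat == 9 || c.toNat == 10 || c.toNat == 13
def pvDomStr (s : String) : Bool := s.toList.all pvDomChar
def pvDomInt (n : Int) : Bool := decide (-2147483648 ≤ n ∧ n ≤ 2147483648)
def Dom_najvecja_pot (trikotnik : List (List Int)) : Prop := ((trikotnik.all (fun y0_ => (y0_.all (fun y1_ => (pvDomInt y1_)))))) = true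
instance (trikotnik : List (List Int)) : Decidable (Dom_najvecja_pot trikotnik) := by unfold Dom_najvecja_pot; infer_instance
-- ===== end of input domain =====

-- B replaces A's destructive recursion (pop/pop/insert, range-index comprehension, recursive
-- call per row) by one iterative fold merging each row into an accumulator with max();
-- A mutates its argument in place, so the equivalence proved here is about the return value only.

-- ===== PORT A =====
-- A's merged row: for i in range(len(r1)), vsota1/vsota2 with A's `>` tie-break.
-- Out-of-range indexing (Python IndexError) is rendered with default 0; Pre_ excludes those inputs.
def najvecja_pot_row (r0 r1 : List Int) : List Int :=
  (List.range r1.length).map (fun (i : Nat) =>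
    let vsota1 := PySem.List.pyGetD r1 (i : Int) 0 + PySem.List.pyGetD r0 (i : Int) 0
    let vsota2 := PySem.List.pyGetD r1 (i : Int) 0 + PySem.List.pyGetD r0 ((i : Int) + 1) 0
    if vsota2 > vsota1 then vsota2 else vsota1)

def najvecja_pot (trikotnik : List (List Int)) : List (List Int) :=
  match trikotnik with
  | [] => []            -- Python raises IndexError here; excluded by Pre_
  | [r] => [r]          -- len(trikotnik) == 1
  | r0 :: r1 :: rest => najvecja_pot (najvecja_pot_row r0 r1 :: rest)
termination_by trikotnik.length

-- ===== PORT B =====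
-- inner loop: nxt = []; j = 0; for v in row: nxt.append(v + max(acc[j], acc[j+1])); j += 1
-- (state = (nxt, j); acc[j] with default 0, Pre_ excludes the raising inputs)
def mergeRow (acc row : List Int) : List Int :=
  (row.foldl (fun (s : List Int × Nat) v =>
      (s.1 ++ [v + max (PySem.List.pyGetD acc (s.2 : Int) 0)
                       (PySem.List.pyGetD acc ((s.2 : Int) + 1) 0)],
       s.2 + 1))
    (([] : List Int), 0)).1

def najvecja_pot_alt (trikotnik : List (List Int)) : List (List Int) :=
  match trikotnik with
  | [] => []            -- Python B raises IndexError (trikotnik[0]); excluded by Pre_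
  | r0 :: rest => [rest.foldl mergeRow r0]

-- ===== PRECONDITION & SPEC =====
-- Pre_: nonempty, and each row empty or strictly shorter than the one before it
-- (both Pythons raise IndexError otherwise).
def rowsDecreasing (trikotnik : List (List Int)) : Bool :=
  (trikotnik.zip trikotnik.tail).all (fun p => p.2.length == 0 || decide (p.2.length < p.1.length))

def Pre_najvecja_pot (trikotnik : List (List Int)) : Prop :=
  trikotnik ≠ [] ∧ rowsDecreasing trikotnik = true
instance (trikotnik : List (List Int)) : Decidable (Pre_najvecja_pot trikotnik) := by
  unfold Pre_najvecja_pot; infer_instance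

def pvWitness_najvecja_pot : List (List Int) := [[3, 7, 4], [2, 4], [5]]

def Spec_najvecja_pot (trikotnik : List (List Int)) (out : List (List Int)) : Prop := out = najvecja_pot_alt trikotnik
instance (trikotnik : List (List Int)) (out : List (List Int)) : Decidable (Spec_najvecja_pot trikotnik out) := by unfold Spec_najvecja_pot; infer_instance

-- ===== CLAIM (what is proved, stated in full; the proofs are below) =====
def Claim_equal_najvecja_pot : Prop := ∀ (trikotnik : List (List Int)), Dom_najvecja_pot trikotnik → Pre_najvecja_pot trikotnik → Spec_najvecja_pot trikotnik (najvecja_pot trikotnik)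

-- ===== LEMMAS AND PROOFS =====

-- B's inner loop characterised: it appends, for each (value, index) pair of the row
-- counted from j, the merged entry.
lemma mergeRow_foldl (acc row pre : List Int) (j : Nat) :
    (row.foldl (fun (s : List Int × Nat) v =>
        (s.1 ++ [v + max (PySem.List.pyGetD acc (s.2 : Int) 0)
                         (PySem.List.pyGetD acc ((s.2 : Int) + 1) 0)],
         s.2 + 1))
      (pre, j)).1 =
    pre ++ (row.zipIdx j).map (fun p =>
      p.1 + max (PySem.List.pyGetD acc (p.2 : Int) 0)
                (PySem.List.pyGetD acc ((p.2 : Int) + 1) 0)) := by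
  induction row generalizing pre j with
  | nil => simp
  | cons v vs ih =>
    simp only [List.foldl_cons, List.zipIdx_cons, List.map_cons]
    rw [ih]
    simp

-- A's merged row is B's merged row: the `>` tie-break computes the max,
-- and the row value A re-indexes is the element B iterates over.
lemma row_eq (r0 r1 : List Int) : najvecja_pot_row r0 r1 = mergeRow r0 r1 := by
  unfold najvecja_pot_row mergeRow
  rw [mergeRow_foldl r0 r1 [] 0]
  apply List.ext_getElem (by simp)
  intro i h1 h2
  simp only [List.getElem_map, List.getElem_range, List.getElem_zipIdx, List.nil_append,
    Nat.zero_add]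
  have hi : i < r1.length := by simpa using h1
  rw [show PySem.List.pyGetD r1 (i : Int) 0 = r1[i] from by
    rw [PySem.List.pyGetD_natCast]; simp [List.getD_eq_getElem?_getD, hi]]
  rw [max_def]
  split_ifs <;> omega

lemma main_eq (rest : List (List Int)) (r0 : List Int) :
    najvecja_pot (r0 :: rest) = [rest.foldl mergeRow r0] := by
  induction rest generalizing r0 with
  | nil => simp [najvecja_pot]
  | cons r1 rs ih =>
    have step : najvecja_pot (r0 :: r1 :: rs) = najvecja_pot (najvecja_pot_row r0 r1 :: rs) := by
      simp [najvecja_pot]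
    rw [step, row_eq, ih (mergeRow r0 r1)]
    simp

-- ===== VERDICT (by name: the statement is the Claim_ definition above) =====
theorem najvecja_pot_spec : Claim_equal_najvecja_pot := by
  intro t _ hpre
  cases t with
  | nil => exact absurd rfl hpre.1
  | cons r0 rest =>
    show najvecja_pot (r0 :: rest) = najvecja_pot_alt (r0 :: rest)
    rw [main_eq rest r0]; rfl
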